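-- pv_equiv track=rewrite | github.com/jjaspe/python | Problem_502_Counting_Castles.py | getOddCastles
-- ===== SOURCE A (Python) =====
-- def getOddCastles(width,realHeight):
--     previousEvenCastlesByHeight=getFirstArrayOfEvenCastlesPerHeight(realHeight)
--     previousOddCastlesByHeight=getFirstArrayOfOddCastlesPerHeight(realHeight)
--     for currentColumn in range(1,width):
--         temp=getNextArrayOfEvenCastlesPerHeight(realHeight,previousEvenCastlesByHeight,previousOddCastlesByHeight)
--         previousOddCastlesByHeight=getNextArrayOfOddCastlesPerHeight(realHeight,previousEvenCastlesByHeight,previousOddCastlesByHeight)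
--         previousEvenCastlesByHeight=temp
--     return sum(previousOddCastlesByHeight)
--
-- def getFirstArrayOfEvenCastlesPerHeight(totalHeight):
--     evenCastlesByHeight=[]
--     for index in range(totalHeight+1):
--         if index%2==0:
--             evenCastlesByHeight.append(1)
--         else:
--             evenCastlesByHeight.append(0)
--
--     return evenCastlesByHeight
--
-- def getFirstArrayOfOddCastlesPerHeight(totalHeight):
--     oddCastlesByHeight=[]
--     for index in range(totalHeight+1):
--         if index%2==0:
--             oddCastlesByHeight.append(0)
--         else:
--             oddCastlesByHeight.append(1)
--
--     return oddCastlesByHeight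
--
-- def getNextArrayOfEvenCastlesPerHeight(totalHeight, previousArrayOfEvenCastles, previousArrayOfOddCastles):
--     evenCastlesByHeight=[]
--     evenStart=0
--     for index in range(totalHeight+1):
--         if index%2==0:
--             evenStart=0
--         else:
--             evenStart=1
--         # the (eventStart-1)^2 is to turn eventStart from 0 to 1 and from 1 to 0
--         partialEvenSumAlternating=[previousArrayOfEvenCastles[x] for x in range(evenStart,index-2+1,2)]
--         partialOddSumAlternating=[previousArrayOfOddCastles[x] for x in range((evenStart-1)**2,index-1+1,2)]
--         evenCastlesByHeight.append(sum(partialEvenSumAlternating)+\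
--                                        sum(previousArrayOfEvenCastles[index:])+\
--                                        sum(partialOddSumAlternating))
--     return evenCastlesByHeight
--
-- def getNextArrayOfOddCastlesPerHeight(totalHeight, previousArrayOfEvenCastles, previousArrayOfOddCastles):
--     oddCastlesByHeight=[]
--     oddStart=0
--     for index in range(totalHeight+1):
--         if index%2==0:
--             oddStart=1
--         else:
--             oddStart=0
--         # the (eventStart-1)^2 is to turn eventStart from 0 to 1 and from 1 to 0
--         partialEvenSumAlternating=[previousArrayOfEvenCastles[x] for x in range(oddStart,index-1+1,2)]
--         partialOddSumAlternating=[previousArrayOfOddCastles[x] for x in range((oddStart-1)**2,index-2+1,2)]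
--         oddCastlesByHeight.append(sum(partialEvenSumAlternating)+\
--                                        sum(previousArrayOfOddCastles[index:])+\
--                                        sum(partialOddSumAlternating))
--     return oddCastlesByHeight
-- ===== SOURCE B (Python) =====
-- def _nextPair(even, odd):
--     te, to = sum(even), sum(odd)
--     ne, no = [], []
--     ae = be = ao = bo = se = so = 0
--     # ae/ao: prefix sum over indices x<i with x%2 == i%2; be/bo: opposite parity; se/so: plain prefix sums
--     for i in range(len(even)):
--         ne.append(ae + (te - se) + bo)
--         no.append(be + (to - so) + ao)
--         ae, be = be, ae + even[i]
--         ao, bo = bo, ao + odd[i]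
--         se += even[i]
--         so += odd[i]
--     return ne, no
--
-- def getOddCastles(width, realHeight):
--     even = [1 - i % 2 for i in range(realHeight + 1)]
--     odd = [i % 2 for i in range(realHeight + 1)]
--     for _ in range(1, width):
--         even, odd = _nextPair(even, odd)
--     return sum(odd)
-- ===== Notes on version B (the rewrite author's own statement) =====
-- stated objective: faster
-- what changed: A recomputes per height index the alternating-parity partial sums and suffix sums by rescanning ranges (O(H) work per index); B keeps running parity-prefix accumulators and column totals, producing both next columns in one pass per column.
import Mathlib
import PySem

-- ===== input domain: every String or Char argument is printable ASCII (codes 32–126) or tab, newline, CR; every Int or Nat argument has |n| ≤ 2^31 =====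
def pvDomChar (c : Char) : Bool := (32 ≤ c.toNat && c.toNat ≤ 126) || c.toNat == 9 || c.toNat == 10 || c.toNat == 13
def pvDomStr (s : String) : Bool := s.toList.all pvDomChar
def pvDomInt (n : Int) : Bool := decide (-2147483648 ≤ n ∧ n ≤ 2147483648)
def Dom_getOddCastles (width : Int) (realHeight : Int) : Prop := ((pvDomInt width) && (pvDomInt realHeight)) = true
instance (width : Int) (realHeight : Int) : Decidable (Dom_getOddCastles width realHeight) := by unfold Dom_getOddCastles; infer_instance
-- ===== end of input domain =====

-- B replaces A's per-index rescans of alternating-parity ranges and suffixes by running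
-- prefix accumulators, one pass per column (objective: faster; measured).

-- ===== PORT A =====
def pvFirstEven (totalHeight : Int) : List Int :=
  (PySem.List.pyRange 0 (totalHeight + 1) 1).foldl
    (fun acc index => acc ++ [if PySem.Int.mod index 2 = 0 then (1 : Int) else 0]) []

def pvFirstOdd (totalHeight : Int) : List Int :=
  (PySem.List.pyRange 0 (totalHeight + 1) 1).foldl
    (fun acc index => acc ++ [if PySem.Int.mod index 2 = 0 then (0 : Int) else 1]) []

def pvNextEven (totalHeight : Int) (prevEven prevOdd : List Int) : List Int :=
  (PySem.List.pyRange 0 (totalHeight + 1) 1).foldl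
    (fun acc index =>
      let evenStart : Int := if PySem.Int.mod index 2 = 0 then 0 else 1
      let partialEven := (PySem.List.pyRange evenStart (index - 2 + 1) 2).map
        (fun x => PySem.List.pyGetD prevEven x 0)
      let partialOdd := (PySem.List.pyRange ((evenStart - 1) ^ 2) (index - 1 + 1) 2).map
        (fun x => PySem.List.pyGetD prevOdd x 0)
      acc ++ [partialEven.sum + (PySem.List.slice prevEven (some index) none).sum + partialOdd.sum]) []

def pvNextOdd (totalHeight : Int) (prevEven prevOdd : List Int) : List Int :=
  (PySem.List.pyRange 0 (totalHeight + 1) 1).foldl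
    (fun acc index =>
      let oddStart : Int := if PySem.Int.mod index 2 = 0 then 1 else 0
      let partialEven := (PySem.List.pyRange oddStart (index - 1 + 1) 2).map
        (fun x => PySem.List.pyGetD prevEven x 0)
      let partialOdd := (PySem.List.pyRange ((oddStart - 1) ^ 2) (index - 2 + 1) 2).map
        (fun x => PySem.List.pyGetD prevOdd x 0)
      acc ++ [partialEven.sum + (PySem.List.slice prevOdd (some index) none).sum + partialOdd.sum]) []

def getOddCastles (width : Int) (realHeight : Int) : Int :=
  ((PySem.List.pyRange 1 width 1).foldl
    (fun st (_ : Int) => (pvNextEven realHeight st.1 st.2, pvNextOdd realHeight st.1 st.2))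
    (pvFirstEven realHeight, pvFirstOdd realHeight)).2.sum

-- ===== PORT B =====
structure PvSt where
  ne : List Int
  no : List Int
  ae : Int
  be : Int
  ao : Int
  bo : Int
  se : Int
  so : Int

def pvStep (ev od : List Int) (te tos : Int) (st : PvSt) (i : Int) : PvSt :=
  let e := PySem.List.pyGetD ev i 0
  let o := PySem.List.pyGetD od i 0
  { ne := st.ne ++ [st.ae + (te - st.se) + st.bo]
    no := st.no ++ [st.be + (tos - st.so) + st.ao]
    ae := st.be
    be := st.ae + e
    ao := st.bo
    bo := st.ao + o
    se := st.se + e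
    so := st.so + o }

def pvNextPair (ev od : List Int) : List Int × List Int :=
  let st := (PySem.List.pyRange 0 (ev.length : Int) 1).foldl
    (pvStep ev od ev.sum od.sum) ⟨[], [], 0, 0, 0, 0, 0, 0⟩
  (st.ne, st.no)

def getOddCastles_alt (width : Int) (realHeight : Int) : Int :=
  ((PySem.List.pyRange 1 width 1).foldl
    (fun st (_ : Int) => pvNextPair st.1 st.2)
    ((PySem.List.pyRange 0 (realHeight + 1) 1).map (fun i => 1 - PySem.Int.mod i 2),
     (PySem.List.pyRange 0 (realHeight + 1) 1).map (fun i => PySem.Int.mod i 2))).2.sum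

-- ===== PRECONDITION & SPEC =====
def Spec_getOddCastles (width : Int) (realHeight : Int) (out : Int) : Prop := out = getOddCastles_alt width realHeight
instance (width : Int) (realHeight : Int) (out : Int) : Decidable (Spec_getOddCastles width realHeight out) := by unfold Spec_getOddCastles; infer_instance

-- ===== CLAIM (what is proved, stated in full; the proofs are below) =====
def Claim_equal_getOddCastles : Prop := ∀ (width : Int) (realHeight : Int), Dom_getOddCastles width realHeight → Spec_getOddCastles width realHeight (getOddCastles width realHeight)

-- ===== LEMMAS AND PROOFS =====

-- parSum l p n = sum of l[x] (default 0) over x < n with x % 2 = p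
def parSum (l : List Int) (p n : Nat) : Int :=
  (((List.range n).filter (fun x => x % 2 == p)).map (fun x => l.getD x 0)).sum

-- preSum l n = sum of l[x] (default 0) over x < n
def preSum (l : List Int) (n : Nat) : Int :=
  ((List.range n).map (fun x => l.getD x 0)).sum

-- closed form of one entry of the next even / odd column
def gE (e o : List Int) (i : Nat) : Int :=
  parSum e (i % 2) i + (e.sum - preSum e i) + parSum o ((i + 1) % 2) i

def gO (e o : List Int) (i : Nat) : Int :=
  parSum e ((i + 1) % 2) i + (o.sum - preSum o i) + parSum o (i % 2) i

theorem parSum_succ (l : List Int) (p n : Nat) :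
    parSum l p (n + 1) = parSum l p n + (if n % 2 = p then l.getD n 0 else 0) := by
  by_cases h : n % 2 = p <;>
    simp [parSum, List.range_succ, List.filter_append, h]

theorem preSum_succ (l : List Int) (n : Nat) :
    preSum l (n + 1) = preSum l n + l.getD n 0 := by
  simp [preSum, List.range_succ]

theorem preSum_eq_take (l : List Int) (n : Nat) :
    preSum l n = (l.take n).sum := by
  induction n with
  | zero => simp [preSum]
  | succ n ih =>
      rw [preSum_succ, ih, List.take_add_one]
      rcases h : l[n]? with _ | v <;>
        simp [h, List.getD_eq_getElem?_getD]

theorem sum_drop (l : List Int) (n : Nat) :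
    (l.drop n).sum = l.sum - preSum l n := by
  rw [preSum_eq_take]
  have := List.sum_take_add_sum_drop l n
  linarith

theorem pyRange_two_succ (a b : Int) :
    PySem.List.pyRange a (b + 1) 2 =
      PySem.List.pyRange a b 2 ++ (if a ≤ b ∧ (b - a) % 2 = 0 then [b] else []) := by
  rw [PySem.List.pyRange_of_pos a (b+1) (by norm_num),
      PySem.List.pyRange_of_pos a b (by norm_num)]
  by_cases h1 : a ≤ b
  · by_cases h2 : (b - a) % 2 = 0
    · rw [if_pos (show a < b + 1 by omega),
          show ((b + 1 - a + 2 - 1) / 2).toNat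
              = (if a < b then ((b - a + 2 - 1) / 2).toNat else 0) + 1 from by
            split_ifs <;> omega,
          List.range_succ, List.map_append,
          if_pos (show a ≤ b ∧ (b - a) % 2 = 0 from ⟨h1, h2⟩)]
      congr 1
      rw [show (if a < b then ((b - a + 2 - 1) / 2).toNat else 0) = ((b - a) / 2).toNat from by
            split_ifs <;> omega]
      simp only [List.map_cons, List.map_nil]
      congr 1
      omega
    · rw [if_pos (show a < b + 1 by omega),
          if_neg (show ¬(a ≤ b ∧ (b - a) % 2 = 0) from fun hc => h2 hc.2),
          List.append_nil,
          show ((b + 1 - a + 2 - 1) / 2).toNat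
              = (if a < b then ((b - a + 2 - 1) / 2).toNat else 0) from by
            split_ifs <;> omega]
  · rw [if_neg (show ¬ a < b + 1 by omega),
        if_neg (show ¬ a < b by omega),
        if_neg (show ¬(a ≤ b ∧ (b - a) % 2 = 0) from fun hc => h1 hc.1),
        List.append_nil]

-- drop the final slot of a step-2 range when its parity does not match
theorem pyRange_drop_top (a b : Int) (h : ¬(a ≤ b - 1 ∧ (b - 1 - a) % 2 = 0)) :
    PySem.List.pyRange a b 2 = PySem.List.pyRange a (b - 1) 2 := by
  have hb := pyRange_two_succ a (b - 1)
  rw [if_neg h, List.append_nil] at hb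
  simpa using hb

theorem sum_map_pyRange_two (l : List Int) (p n : Nat) (hp : p < 2) :
    ((PySem.List.pyRange (p : Int) (n : Int) 2).map (fun x => PySem.List.pyGetD l x 0)).sum
      = parSum l p n := by
  induction n with
  | zero =>
      rcases (by omega : p = 0 ∨ p = 1) with rfl | rfl <;> simp [parSum, PySem.List.pyRange]
  | succ n ih =>
      have hn : ((n : Int) + 1) = ((n + 1 : Nat) : Int) := by push_cast; ring
      rw [← hn, pyRange_two_succ, List.map_append, List.sum_append, ih, parSum_succ]
      congr 1
      by_cases h : n % 2 = p
      · rw [if_pos (by constructor <;> omega), if_pos h]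
        simp
      · rw [if_neg (by omega), if_neg h]
        rfl

theorem foldB (e o : List Int) (n : Nat) :
    ((List.range n).map (fun k => Int.ofNat k)).foldl
        (pvStep e o e.sum o.sum) ⟨[], [], 0, 0, 0, 0, 0, 0⟩
      = ⟨(List.range n).map (gE e o), (List.range n).map (gO e o),
         parSum e (n % 2) n, parSum e ((n + 1) % 2) n,
         parSum o (n % 2) n, parSum o ((n + 1) % 2) n,
         preSum e n, preSum o n⟩ := by
  induction n with
  | zero => simp [parSum, preSum]
  | succ n ih =>
      rw [List.range_succ, List.map_append, List.foldl_append, ih, List.map_cons,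
        List.map_nil, List.foldl_cons, List.foldl_nil]
      have h2 : (n + 1 + 1) % 2 = n % 2 := by omega
      have h3 : n % 2 ≠ (n + 1) % 2 := by omega
      simp only [pvStep, Int.ofNat_eq_natCast, PySem.List.pyGetD_natCast, PvSt.mk.injEq,
        List.range_succ, List.map_append, List.map_cons, List.map_nil]
      and_intros <;>
        first
          | rfl
          | (simp [gE]; done)
          | (simp [gO]; done)
          | (rw [parSum_succ, if_neg h3, add_zero]; done)
          | (rw [h2]; try rw [parSum_succ]; try rw [if_pos rfl]; try simp [List.getD_eq_getElem?_getD]; done)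
          | (rw [preSum_succ]; try simp [List.getD_eq_getElem?_getD]; done)

theorem pyRange_zero_one (m : Int) :
    PySem.List.pyRange 0 m 1 = (List.range m.toNat).map (fun k => Int.ofNat k) := by
  rw [PySem.List.pyRange_one]
  simp

theorem nextPair_eq (ev od : List Int) :
    pvNextPair ev od =
      ((List.range ev.length).map (gE ev od), (List.range ev.length).map (gO ev od)) := by
  unfold pvNextPair
  rw [pyRange_zero_one]
  simp only [Int.toNat_natCast]
  rw [foldB]

theorem nextEven_eq (H : Int) (e o : List Int) :
    pvNextEven H e o = (List.range (H + 1).toNat).map (gE e o) := by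
  unfold pvNextEven
  rw [pyRange_zero_one, List.foldl_map, PySem.List.foldl_append_singleton_eq_map,
    List.nil_append]
  refine List.map_congr_left fun k _ => ?_
  simp only [Int.ofNat_eq_natCast]
  have hm : PySem.Int.mod (k : Int) 2 = ((k % 2 : Nat) : Int) := by
    exact_mod_cast PySem.Int.mod_natCast k 2
  rcases Nat.mod_two_eq_zero_or_one k with h | h
  · simp only [hm, h, Nat.cast_zero]
    norm_num
    have hA := sum_map_pyRange_two e 0 k (by omega)
    have hB := sum_map_pyRange_two o 1 k (by omega)
    simp only [Nat.cast_zero, Nat.cast_one] at hA hB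
    rw [show (k : Int) - 2 + 1 = (k : Int) - 1 from by ring,
      ← pyRange_drop_top 0 (k : Int) (by omega), hA, hB, sum_drop]
    unfold gE
    rw [h, Nat.succ_mod_two_eq_one_iff.mpr h]
  · simp only [hm, h, Nat.cast_one]
    norm_num
    have hA := sum_map_pyRange_two e 1 k (by omega)
    have hB := sum_map_pyRange_two o 0 k (by omega)
    simp only [Nat.cast_zero, Nat.cast_one] at hA hB
    rw [show (k : Int) - 2 + 1 = (k : Int) - 1 from by ring,
      ← pyRange_drop_top 1 (k : Int) (by omega), hA, hB, sum_drop]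
    unfold gE
    rw [h, Nat.succ_mod_two_eq_zero_iff.mpr h]

theorem nextOdd_eq (H : Int) (e o : List Int) :
    pvNextOdd H e o = (List.range (H + 1).toNat).map (gO e o) := by
  unfold pvNextOdd
  rw [pyRange_zero_one, List.foldl_map, PySem.List.foldl_append_singleton_eq_map,
    List.nil_append]
  refine List.map_congr_left fun k _ => ?_
  simp only [Int.ofNat_eq_natCast]
  have hm : PySem.Int.mod (k : Int) 2 = ((k % 2 : Nat) : Int) := by
    exact_mod_cast PySem.Int.mod_natCast k 2
  rcases Nat.mod_two_eq_zero_or_one k with h | h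
  · simp only [hm, h, Nat.cast_zero]
    norm_num
    have hA := sum_map_pyRange_two e 1 k (by omega)
    have hB := sum_map_pyRange_two o 0 k (by omega)
    simp only [Nat.cast_zero, Nat.cast_one] at hA hB
    rw [show (k : Int) - 2 + 1 = (k : Int) - 1 from by ring,
      ← pyRange_drop_top 0 (k : Int) (by omega), hA, hB, sum_drop]
    unfold gO
    rw [h, Nat.succ_mod_two_eq_one_iff.mpr h]
  · simp only [hm, h, Nat.cast_one]
    norm_num
    have hA := sum_map_pyRange_two e 0 k (by omega)
    have hB := sum_map_pyRange_two o 1 k (by omega)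
    simp only [Nat.cast_zero, Nat.cast_one] at hA hB
    rw [show (k : Int) - 2 + 1 = (k : Int) - 1 from by ring,
      ← pyRange_drop_top 1 (k : Int) (by omega), hA, hB, sum_drop]
    unfold gO
    rw [h, Nat.succ_mod_two_eq_zero_iff.mpr h]

theorem outer_eq (H : Int) (L : List Int) (e o : List Int)
    (he : e.length = (H + 1).toNat) :
    L.foldl (fun st (_ : Int) => (pvNextEven H st.1 st.2, pvNextOdd H st.1 st.2)) (e, o)
      = L.foldl (fun st (_ : Int) => pvNextPair st.1 st.2) (e, o) := by
  induction L generalizing e o with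
  | nil => rfl
  | cons x t ih =>
      simp only [List.foldl_cons]
      rw [nextPair_eq, he, ← nextEven_eq H e o, ← nextOdd_eq H e o]
      exact ih _ _ (by rw [nextEven_eq]; simp)

theorem firstEven_eq (H : Int) :
    pvFirstEven H = (PySem.List.pyRange 0 (H + 1) 1).map (fun i => 1 - PySem.Int.mod i 2) := by
  unfold pvFirstEven
  rw [PySem.List.foldl_append_singleton_eq_map, List.nil_append]
  refine List.map_congr_left fun i _ => ?_
  have hm : PySem.Int.mod i 2 = i % 2 :=
    PySem.Int.mod_eq_emod_of_pos (by norm_num)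
  have h2 : i % 2 = 0 ∨ i % 2 = 1 := by omega
  rcases h2 with h | h <;> simp [hm, h]

theorem firstOdd_eq (H : Int) :
    pvFirstOdd H = (PySem.List.pyRange 0 (H + 1) 1).map (fun i => PySem.Int.mod i 2) := by
  unfold pvFirstOdd
  rw [PySem.List.foldl_append_singleton_eq_map, List.nil_append]
  refine List.map_congr_left fun i _ => ?_
  have hm : PySem.Int.mod i 2 = i % 2 :=
    PySem.Int.mod_eq_emod_of_pos (by norm_num)
  have h2 : i % 2 = 0 ∨ i % 2 = 1 := by omega
  rcases h2 with h | h <;> simp [hm, h]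

-- ===== VERDICT (by name: the statement is the Claim_ definition above) =====
theorem getOddCastles_spec : Claim_equal_getOddCastles := by
  intro width realHeight _
  unfold Spec_getOddCastles getOddCastles getOddCastles_alt
  rw [← firstEven_eq, ← firstOdd_eq]
  rw [outer_eq realHeight _ _ _
    (by rw [firstEven_eq]; simp [PySem.List.length_pyRange_one])]
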